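-- pv_equiv track=rewrite | github.com/techstar9797/Parts | dynamic_fff_gradio.py | _packages_compatible
-- ===== SOURCE A (Python) =====
-- def _packages_compatible(pkg1: str, pkg2: str) -> bool:
--     compatible_groups = [
--         ["SOIC-8", "SOP-8", "MSOP-8"],
--         ["DIP-8", "PDIP-8"],
--         ["QFN-8", "DFN-8"]
--     ]
--     for group in compatible_groups:
--         if pkg1 in group and pkg2 in group:
--             return True
--     return False
-- ===== SOURCE B (Python) =====
-- _COMPATIBLE_GROUPS = [
--     ["SOIC-8", "SOP-8", "MSOP-8"],
--     ["DIP-8", "PDIP-8"],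
--     ["QFN-8", "DFN-8"]
-- ]
--
-- _PKG_TO_GROUP = {}
-- for _i, _group in enumerate(_COMPATIBLE_GROUPS):
--     for _name in _group:
--         _PKG_TO_GROUP[_name] = _i
--
--
-- def _packages_compatible(pkg1: str, pkg2: str) -> bool:
--     g1 = _PKG_TO_GROUP.get(pkg1)
--     g2 = _PKG_TO_GROUP.get(pkg2)
--     return g1 is not None and g1 == g2
-- ===== Notes on version B (the rewrite author's own statement) =====
-- stated objective: idiomatic
-- what changed: Replaces the per-call loop over groups with double membership tests by a module-level dict mapping each package name to its group index, built once; the function becomes two lookups and an index comparison (None-guarded).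
import Mathlib
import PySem

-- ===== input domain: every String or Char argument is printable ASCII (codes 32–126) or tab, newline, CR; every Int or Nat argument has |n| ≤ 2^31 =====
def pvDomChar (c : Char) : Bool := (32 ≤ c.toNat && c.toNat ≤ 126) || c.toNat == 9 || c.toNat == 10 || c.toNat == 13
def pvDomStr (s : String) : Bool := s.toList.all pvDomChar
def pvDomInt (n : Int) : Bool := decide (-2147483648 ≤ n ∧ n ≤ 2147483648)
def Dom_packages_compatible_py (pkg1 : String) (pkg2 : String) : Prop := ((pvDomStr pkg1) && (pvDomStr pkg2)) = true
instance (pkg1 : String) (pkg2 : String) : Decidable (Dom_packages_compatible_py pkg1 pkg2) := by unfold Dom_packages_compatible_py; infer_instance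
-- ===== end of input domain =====

-- B replaces A's per-call loop-with-double-membership by a precomputed name→group-index dict and an index comparison (idiomatic; not faster on these tiny fixed groups).

-- ===== PORT A =====
-- the 'for group in compatible_groups: if pkg1 in group and pkg2 in group: return True' loop
def pcLoopA (pkg1 pkg2 : String) : List (List String) → Bool
  | [] => false
  | g :: rest => if g.contains pkg1 && g.contains pkg2 then true else pcLoopA pkg1 pkg2 rest

def packages_compatible_py (pkg1 : String) (pkg2 : String) : Bool :=
  pcLoopA pkg1 pkg2
    [["SOIC-8", "SOP-8", "MSOP-8"],
     ["DIP-8", "PDIP-8"],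
     ["QFN-8", "DFN-8"]]

-- ===== PORT B =====
-- module-level dict built once from the groups: name → group index
def pcDictB : PySem.Dict String Int :=
  (PySem.List.enumerate
    [["SOIC-8", "SOP-8", "MSOP-8"],
     ["DIP-8", "PDIP-8"],
     ["QFN-8", "DFN-8"]]).foldl
    (fun d p => p.2.foldl (fun d n => d.insert n p.1) d)
    PySem.Dict.empty

def packages_compatible_py_alt (pkg1 : String) (pkg2 : String) : Bool :=
  let g1 := pcDictB.get? pkg1
  let g2 := pcDictB.get? pkg2
  g1.isSome && g1 == g2

-- ===== PRECONDITION & SPEC =====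
def Spec_packages_compatible_py (pkg1 : String) (pkg2 : String) (out : Bool) : Prop := out = packages_compatible_py_alt pkg1 pkg2
instance (pkg1 : String) (pkg2 : String) (out : Bool) : Decidable (Spec_packages_compatible_py pkg1 pkg2 out) := by unfold Spec_packages_compatible_py; infer_instance

-- ===== CLAIM (what is proved, stated in full; the proofs are below) =====
def Claim_equal_packages_compatible_py : Prop := ∀ (pkg1 : String) (pkg2 : String), Dom_packages_compatible_py pkg1 pkg2 → Spec_packages_compatible_py pkg1 pkg2 (packages_compatible_py pkg1 pkg2)

-- ===== LEMMAS AND PROOFS =====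
-- the seven package names occurring in the groups
def pcNames : List String := ["SOIC-8", "SOP-8", "MSOP-8", "DIP-8", "PDIP-8", "QFN-8", "DFN-8"]

theorem pcA_notmem (p1 p2 : String) (h : p1 ∉ pcNames) :
    packages_compatible_py p1 p2 = false := by
  simp [pcNames] at h
  obtain ⟨h1, h2, h3, h4, h5, h6, h7⟩ := h
  simp only [packages_compatible_py, pcLoopA, List.contains_cons, List.contains_nil]
  simp [h1, h2, h3, h4, h5, h6, h7]

theorem pcA_comm (p1 p2 : String) :
    packages_compatible_py p1 p2 = packages_compatible_py p2 p1 := by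
  simp [packages_compatible_py, pcLoopA, Bool.and_comm]

theorem pcB_notmem (p1 p2 : String) (h : p1 ∉ pcNames) :
    packages_compatible_py_alt p1 p2 = false := by
  simp [pcNames] at h
  obtain ⟨h1, h2, h3, h4, h5, h6, h7⟩ := h
  have hg : pcDictB.get? p1 = none := by
    simp only [pcDictB, PySem.List.enumerate, PySem.Dict.insert, PySem.Dict.empty,
      PySem.Dict.get?]
    simp
    exact ⟨fun e => h1 e.symm, fun e => h2 e.symm, fun e => h3 e.symm, fun e => h4 e.symm,
      fun e => h5 e.symm, fun e => h6 e.symm, fun e => h7 e.symm⟩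
  simp [packages_compatible_py_alt, hg]

theorem pcB_comm (p1 p2 : String) :
    packages_compatible_py_alt p1 p2 = packages_compatible_py_alt p2 p1 := by
  unfold packages_compatible_py_alt
  cases hg1 : pcDictB.get? p1 <;> cases hg2 : pcDictB.get? p2 <;>
    simp_all [BEq.comm]

-- ===== VERDICT (by name: the statement is the Claim_ definition above) =====
theorem packages_compatible_py_spec : Claim_equal_packages_compatible_py := by
  intro p1 p2 _
  unfold Spec_packages_compatible_py
  by_cases h1 : p1 ∈ pcNames
  · by_cases h2 : p2 ∈ pcNames
    · fin_cases h1 <;> fin_cases h2 <;> decide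
    · rw [pcA_comm, pcB_comm, pcA_notmem p2 p1 h2, pcB_notmem p2 p1 h2]
  · rw [pcA_notmem p1 p2 h1, pcB_notmem p1 p2 h1]
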